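-- pv_equiv track=rewrite | github.com/YabingHu/Applied-Machine-Learning-Penn-CIS519 | hw2.py | extract_features_dev_or_test
-- ===== SOURCE A (Python) =====
-- def extract_features_dev_or_test(data, features):
--     """
--     Extracts feature dictionaries and labels from "data". The only
--     features which should be computed are those in "features". You
--     should add your additional featurization code here.
--
--     TODO: You should add your additional featurization code here.
--     """
--     y = []
--     X = []
--     '''
--     for sentence in data:
--         padded = sentence[:]
--         padded.insert(0, ('SSS', None))
--         padded.append(('EEE', None))
--         for i in range(1, len(padded) - 1):
--             y.append(1 if padded[i][1] == 'I' else -1)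
--             feat1 = 'w-1=' + str(padded[i - 1][0])
--             feat2 = 'w+1=' + str(padded[i + 1][0])
--             feats = [feat1, feat2]
--             feats = {feature: 1 for feature in feats if feature in features}
--             X.append(feats)
--     return X, y
--     '''
--
--     for sentence in data:
--             padded = sentence[:]
--             padded.insert(0, ('SSS', None))
--             padded.insert(0, ('SSS', None))
--             padded.insert(0, ('SSS', None))
--             padded.append(('EEE', None))
--             padded.append(('EEE', None))
--             padded.append(('EEE', None))
--             for i in range(3, len(padded) - 3):
--                 y.append(1 if padded[i][1] == 'I' else -1)
--                 feat1 = 'w-1=' + str(padded[i - 1][0])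
--                 feat2 = 'w+1=' + str(padded[i + 1][0])
--                 feat3 ='w-2='+str(padded[i-2][0])
--                 feat4 ='w+2='+str(padded[i+2][0])
--                 feat5 ='w-3='+str(padded[i-3][0])
--                 feat6 ='w+3='+str(padded[i+3][0])
--                 feat7= feat1+'&'+ feat3
--                 feat8= feat2+'&'+ feat4
--                 feat9= feat1+'&'+ feat2
--
--                 feats = [feat1, feat2, feat3, feat4, feat5, feat6, feat7, feat8, feat9]
--
--                 feats = {feature: 1 for feature in feats if feature in features}
--                 X.append(feats)
--     return X, y
-- ===== SOURCE B (Python) =====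
-- def extract_features_dev_or_test(data, features):
--     """Same features/labels, built from six pre-shifted word streams zipped
--     together (staged passes) instead of an indexed loop over a padded copy."""
--     X, y = [], []
--     for sentence in data:
--         words = [w for w, _ in sentence]
--         n = len(words)
--
--         def shifted(o):
--             if o < 0:
--                 return ['SSS'] * min(-o, n) + words[:max(0, n + o)]
--             return words[o:] + ['EEE'] * min(o, n)
--
--         y.extend(1 if tag == 'I' else -1 for _, tag in sentence)
--         for wm1, wp1, wm2, wp2, wm3, wp3 in zip(shifted(-1), shifted(1),
--                                                 shifted(-2), shifted(2),
--                                                 shifted(-3), shifted(3)):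
--             f1 = 'w-1=' + wm1
--             f2 = 'w+1=' + wp1
--             f3 = 'w-2=' + wm2
--             f4 = 'w+2=' + wp2
--             f5 = 'w-3=' + wm3
--             f6 = 'w+3=' + wp3
--             feats = [f1, f2, f3, f4, f5, f6,
--                      f1 + '&' + f3, f2 + '&' + f4, f1 + '&' + f2]
--             X.append({f: 1 for f in feats if f in features})
--     return X, y
-- ===== Notes on version B (the rewrite author's own statement) =====
-- stated objective: alternative
-- what changed: B replaces A's per-index loop over a sentinel-padded copy by staged passes: it extracts the word list, builds six pre-shifted streams (sentinel-filled slices for each offset -3..3), zips them, and emits one feature dict per zipped tuple, with labels produced by a separate extend pass.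
import Mathlib
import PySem

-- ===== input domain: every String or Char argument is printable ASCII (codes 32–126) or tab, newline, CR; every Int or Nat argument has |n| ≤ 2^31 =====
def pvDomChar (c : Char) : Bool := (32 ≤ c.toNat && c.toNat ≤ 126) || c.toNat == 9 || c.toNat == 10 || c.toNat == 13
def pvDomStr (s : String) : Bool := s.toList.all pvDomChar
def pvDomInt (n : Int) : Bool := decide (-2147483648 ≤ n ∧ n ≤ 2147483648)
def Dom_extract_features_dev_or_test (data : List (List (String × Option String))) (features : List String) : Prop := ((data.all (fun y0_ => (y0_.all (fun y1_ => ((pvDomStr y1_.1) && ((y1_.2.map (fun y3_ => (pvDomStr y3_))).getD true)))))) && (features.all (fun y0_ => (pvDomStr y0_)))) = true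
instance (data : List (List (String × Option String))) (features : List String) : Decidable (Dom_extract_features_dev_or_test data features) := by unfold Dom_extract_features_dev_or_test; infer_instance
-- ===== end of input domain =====

-- B builds the features by staged passes — six pre-shifted, sentinel-filled word
-- streams zipped together, labels by a separate pass — instead of A's indexed loop
-- over a sentinel-padded copy of each sentence (objective: alternative).

-- ===== PORT A =====
-- A pads each sentence and scans indices 3 .. len(padded)-4; every index it reads is in
-- range, so pyGetD's default ("", none) is never used (Python would raise out of range).
def extract_features_dev_or_test (data : List (List (String × Option String))) (features : List String) : (List (List (String × Int))) × List Int :=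
  data.foldl (fun acc sentence =>
    let padded : List (String × Option String) :=
      ("SSS", none) :: ("SSS", none) :: ("SSS", none) ::
        (sentence ++ [("EEE", none), ("EEE", none), ("EEE", none)])
    (PySem.List.pyRange 3 ((padded.length : Int) - 3) 1).foldl (fun acc i =>
      let y := acc.2 ++ [if (PySem.List.pyGetD padded i ("", none)).2 = some "I" then (1 : Int) else -1]
      let feat1 := "w-1=" ++ (PySem.List.pyGetD padded (i - 1) ("", none)).1
      let feat2 := "w+1=" ++ (PySem.List.pyGetD padded (i + 1) ("", none)).1
      let feat3 := "w-2=" ++ (PySem.List.pyGetD padded (i - 2) ("", none)).1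
      let feat4 := "w+2=" ++ (PySem.List.pyGetD padded (i + 2) ("", none)).1
      let feat5 := "w-3=" ++ (PySem.List.pyGetD padded (i - 3) ("", none)).1
      let feat6 := "w+3=" ++ (PySem.List.pyGetD padded (i + 3) ("", none)).1
      let feat7 := feat1 ++ "&" ++ feat3
      let feat8 := feat2 ++ "&" ++ feat4
      let feat9 := feat1 ++ "&" ++ feat2
      let featsL := [feat1, feat2, feat3, feat4, feat5, feat6, feat7, feat8, feat9]
      let feats := (featsL.foldl (fun d f => if features.contains f then d.insert f 1 else d)
        (PySem.Dict.empty : PySem.Dict String Int)).items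
      (acc.1 ++ [feats], y)) acc) ([], [])

-- ===== PORT B =====
-- Source B's helper shifted(o): the word stream shifted by offset o, filled with sentinels.
def pvShift (words : List String) (o : Int) : List String :=
  if o < 0 then
    List.replicate (min (-o) (words.length : Int)).toNat "SSS" ++
      PySem.List.slice words none (some (max 0 ((words.length : Int) + o)))
  else
    PySem.List.slice words (some o) none ++
      List.replicate (min o (words.length : Int)).toNat "EEE"

def extract_features_dev_or_test_alt (data : List (List (String × Option String))) (features : List String) : (List (List (String × Int))) × List Int :=
  data.foldl (fun acc sentence =>
    let words := sentence.map Prod.fst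
    let y := acc.2 ++ sentence.map (fun p => if p.2 = some "I" then (1 : Int) else -1)
    let z := (pvShift words (-1)).zip ((pvShift words 1).zip ((pvShift words (-2)).zip
      ((pvShift words 2).zip ((pvShift words (-3)).zip (pvShift words 3)))))
    let X := z.foldl (fun X t =>
      let f1 := "w-1=" ++ t.1
      let f2 := "w+1=" ++ t.2.1
      let f3 := "w-2=" ++ t.2.2.1
      let f4 := "w+2=" ++ t.2.2.2.1
      let f5 := "w-3=" ++ t.2.2.2.2.1
      let f6 := "w+3=" ++ t.2.2.2.2.2
      let featsL := [f1, f2, f3, f4, f5, f6, f1 ++ "&" ++ f3, f2 ++ "&" ++ f4, f1 ++ "&" ++ f2]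
      let feats := (featsL.foldl (fun d f => if features.contains f then d.insert f 1 else d)
        (PySem.Dict.empty : PySem.Dict String Int)).items
      X ++ [feats]) acc.1
    (X, y)) ([], [])

-- ===== PRECONDITION & SPEC =====
def Spec_extract_features_dev_or_test (data : List (List (String × Option String))) (features : List String) (out : (List (List (String × Int))) × List Int) : Prop := out = extract_features_dev_or_test_alt data features
instance (data : List (List (String × Option String))) (features : List String) (out : (List (List (String × Int))) × List Int) : Decidable (Spec_extract_features_dev_or_test data features out) := by unfold Spec_extract_features_dev_or_test; infer_instance

-- ===== CLAIM =====
def Claim_equal_extract_features_dev_or_test : Prop := ∀ (data : List (List (String × Option String))) (features : List String), Dom_extract_features_dev_or_test data features → Spec_extract_features_dev_or_test data features (extract_features_dev_or_test data features)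

-- ===== LEMMAS AND PROOFS =====

-- Canonical per-token forms both ports are reduced to.
def pvW (s : List (String × Option String)) (t : Int) : String :=
  if t < 0 then "SSS"
  else if (s.length : Int) ≤ t then "EEE"
  else (PySem.List.pyGetD s t ("", none)).1

def pvLab (s : List (String × Option String)) (k : Nat) : Int :=
  if (PySem.List.pyGetD s (k : Int) ("", none)).2 = some "I" then 1 else -1

def pvFeats (features : List String) (s : List (String × Option String)) (k : Nat) : List (String × Int) :=
  let f1 := "w-1=" ++ pvW s ((k : Int) + -1)
  let f2 := "w+1=" ++ pvW s ((k : Int) + 1)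
  let f3 := "w-2=" ++ pvW s ((k : Int) + -2)
  let f4 := "w+2=" ++ pvW s ((k : Int) + 2)
  let f5 := "w-3=" ++ pvW s ((k : Int) + -3)
  let f6 := "w+3=" ++ pvW s ((k : Int) + 3)
  ([f1, f2, f3, f4, f5, f6, f1 ++ "&" ++ f3, f2 ++ "&" ++ f4, f1 ++ "&" ++ f2].foldl
    (fun d f => if features.contains f then d.insert f 1 else d)
    (PySem.Dict.empty : PySem.Dict String Int)).items

lemma pv_foldl_pair {α β γ : Type} (L : List α) (f : α → β) (g : α → γ) (acc : List β × List γ) :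
    L.foldl (fun a x => (a.1 ++ [f x], a.2 ++ [g x])) acc = (acc.1 ++ L.map f, acc.2 ++ L.map g) := by
  induction L generalizing acc with
  | nil => simp
  | cons x L ih => simp [ih]

lemma pv_foldl_app {α β : Type} (L : List α) (h : α → β) (init : List β) :
    L.foldl (fun X t => X ++ [h t]) init = init ++ L.map h := by
  induction L generalizing init with
  | nil => simp
  | cons x L ih => simp [ih]

-- Reading the padded list at offset 3 + t is 'SSS' for t < 0, 'EEE' for t ≥ len, else sentence[t].
lemma pv_padded_get (s : List (String × Option String)) (t : Int)
    (ht1 : -3 ≤ t) (ht2 : t ≤ (s.length : Int) + 2) :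
    PySem.List.pyGetD
      (("SSS", none) :: ("SSS", none) :: ("SSS", none) ::
        (s ++ [("EEE", none), ("EEE", none), ("EEE", none)])) (3 + t) ("", none)
    = if t < 0 then ("SSS", (none : Option String))
      else if (s.length : Int) ≤ t then ("EEE", none)
      else PySem.List.pyGetD s t ("", none) := by
  rw [PySem.List.pyGetD_of_nonneg _ _ (by omega)]
  split_ifs with h1 h2
  · have h : (3 + t).toNat = 0 ∨ (3 + t).toNat = 1 ∨ (3 + t).toNat = 2 := by omega
    rcases h with h | h | h <;> simp [h]
  · have h : ∃ m : Nat, (3 + t).toNat = ((s.length + m) + 2) + 1 ∧ m < 3 :=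
      ⟨((3 + t).toNat - 3 - s.length), by omega⟩
    obtain ⟨m, hm, hm3⟩ := h
    rw [hm, List.getD_cons_succ]
    have h2' : s.length + m + 2 = (s.length + m + 1) + 1 := by omega
    rw [h2', List.getD_cons_succ]
    have h3' : s.length + m + 1 = (s.length + m) + 1 := by omega
    rw [h3', List.getD_cons_succ]
    rw [List.getD_eq_getElem?_getD, List.getElem?_append_right (by omega : s.length ≤ s.length + m)]
    simp only [Nat.add_sub_cancel_left]
    interval_cases m <;> simp
  · rw [PySem.List.pyGetD_of_nonneg _ _ (by omega)]
    have h : (3 + t).toNat = ((t.toNat + 2)) + 1 := by omega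
    rw [h, List.getD_cons_succ]
    have h2' : t.toNat + 2 = (t.toNat + 1) + 1 := by omega
    rw [h2', List.getD_cons_succ, List.getD_cons_succ]
    rw [List.getD_eq_getElem?_getD, List.getD_eq_getElem?_getD,
      List.getElem?_append_left (by omega : t.toNat < s.length)]

lemma pv_shift_length (words : List String) (o : Int) : (pvShift words o).length = words.length := by
  unfold pvShift
  by_cases ho : o < 0
  · rw [if_pos ho, PySem.List.slice_to _ (by omega)]
    simp only [List.length_append, List.length_replicate, List.length_take]
    omega
  · rw [if_neg ho, PySem.List.slice_from _ (by omega)]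
    simp only [List.length_append, List.length_replicate, List.length_drop]
    omega

lemma pv_shift_get? (words : List String) (o : Int) (k : Nat) (hk : k < words.length) :
    (pvShift words o)[k]? =
      if (k : Int) + o < 0 then some "SSS"
      else if (words.length : Int) ≤ (k : Int) + o then some "EEE"
      else words[((k : Int) + o).toNat]? := by
  unfold pvShift
  by_cases ho : o < 0
  · rw [if_pos ho, PySem.List.slice_to _ (by omega)]
    by_cases h1 : (k : Int) + o < 0
    · rw [List.getElem?_append_left (by simp only [List.length_replicate]; omega)]
      rw [List.getElem?_replicate, if_pos (by omega), if_pos h1]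
    · rw [List.getElem?_append_right (by simp only [List.length_replicate]; omega)]
      simp only [List.length_replicate]
      rw [List.getElem?_take, if_pos (by omega), if_neg h1, if_neg (by omega)]
      congr 1
      omega
  · rw [if_neg ho, PySem.List.slice_from _ (by omega)]
    by_cases h2 : (words.length : Int) ≤ (k : Int) + o
    · rw [List.getElem?_append_right (by simp only [List.length_drop]; omega)]
      rw [List.getElem?_replicate, if_pos (by simp only [List.length_drop]; omega),
        if_neg (by omega), if_pos h2]
    · rw [List.getElem?_append_left (by simp only [List.length_drop]; omega)]
      rw [List.getElem?_drop, if_neg (by omega), if_neg h2]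
      congr 1
      omega

lemma pv_zip_eq (s : List (String × Option String)) :
    (pvShift (s.map Prod.fst) (-1)).zip ((pvShift (s.map Prod.fst) 1).zip ((pvShift (s.map Prod.fst) (-2)).zip
      ((pvShift (s.map Prod.fst) 2).zip ((pvShift (s.map Prod.fst) (-3)).zip (pvShift (s.map Prod.fst) 3)))))
    = (List.range s.length).map (fun (k : Nat) =>
        (pvW s ((k : Int) + -1), (pvW s ((k : Int) + 1), (pvW s ((k : Int) + -2),
          (pvW s ((k : Int) + 2), (pvW s ((k : Int) + -3), pvW s ((k : Int) + 3))))))) := by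
  apply List.ext_getElem
  · simp [pv_shift_length]
  · intro i h1 h2
    have hi : i < s.length := by simpa using h2
    have comp : ∀ (o : Int) (h : i < (pvShift (s.map Prod.fst) o).length),
        (pvShift (s.map Prod.fst) o)[i] = pvW s ((i : Int) + o) := by
      intro o h
      have h' := pv_shift_get? (s.map Prod.fst) o i (by simpa using hi)
      rw [List.getElem?_eq_getElem h] at h'
      unfold pvW
      simp only [List.length_map] at h'
      split_ifs at h' ⊢ with hA hB
      · exact Option.some.inj h'
      · exact Option.some.inj h'
      · rw [List.getElem?_map,
          List.getElem?_eq_getElem (by omega : ((i : Int) + o).toNat < s.length)] at h'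
        rw [PySem.List.pyGetD_eq_getElem _ _ (by omega) (by omega)]
        simpa using h'
    simp only [List.getElem_zip, List.getElem_map, List.getElem_range, comp]

lemma pv_lab_map (s : List (String × Option String)) :
    s.map (fun p => if p.2 = some "I" then (1 : Int) else -1)
    = (List.range s.length).map (pvLab s) := by
  apply List.ext_getElem
  · simp
  · intro i h1 h2
    simp only [List.getElem_map, List.getElem_range]
    unfold pvLab
    rw [PySem.List.pyGetD_natCast, List.getD_eq_getElem _ _ (by simpa using h1)]

lemma pv_stepA (features : List String) (s : List (String × Option String))
    (acc : (List (List (String × Int))) × List Int) :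
    (PySem.List.pyRange 3 (((("SSS", (none : Option String)) :: ("SSS", none) :: ("SSS", none) ::
        (s ++ [("EEE", none), ("EEE", none), ("EEE", none)])).length : Int) - 3) 1).foldl (fun acc i =>
      let padded := ("SSS", (none : Option String)) :: ("SSS", none) :: ("SSS", none) ::
        (s ++ [("EEE", none), ("EEE", none), ("EEE", none)])
      let y := acc.2 ++ [if (PySem.List.pyGetD padded i ("", none)).2 = some "I" then (1 : Int) else -1]
      let feat1 := "w-1=" ++ (PySem.List.pyGetD padded (i - 1) ("", none)).1
      let feat2 := "w+1=" ++ (PySem.List.pyGetD padded (i + 1) ("", none)).1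
      let feat3 := "w-2=" ++ (PySem.List.pyGetD padded (i - 2) ("", none)).1
      let feat4 := "w+2=" ++ (PySem.List.pyGetD padded (i + 2) ("", none)).1
      let feat5 := "w-3=" ++ (PySem.List.pyGetD padded (i - 3) ("", none)).1
      let feat6 := "w+3=" ++ (PySem.List.pyGetD padded (i + 3) ("", none)).1
      let feat7 := feat1 ++ "&" ++ feat3
      let feat8 := feat2 ++ "&" ++ feat4
      let feat9 := feat1 ++ "&" ++ feat2
      let featsL := [feat1, feat2, feat3, feat4, feat5, feat6, feat7, feat8, feat9]
      let feats := (featsL.foldl (fun d f => if features.contains f then d.insert f 1 else d)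
        (PySem.Dict.empty : PySem.Dict String Int)).items
      (acc.1 ++ [feats], y)) acc
    = (acc.1 ++ (List.range s.length).map (pvFeats features s),
       acc.2 ++ (List.range s.length).map (pvLab s)) := by
  have hb : (((("SSS", (none : Option String)) :: ("SSS", none) :: ("SSS", none) ::
      (s ++ [("EEE", none), ("EEE", none), ("EEE", none)])).length : Int) - 3) = (s.length : Int) + 3 := by
    simp
    omega
  rw [hb, PySem.List.pyRange_one 3]
  have h1 : ((s.length : Int) + 3 - 3).toNat = s.length := by omega
  rw [h1, List.foldl_map]
  rw [PySem.List.foldl_congr_mem _ _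
    (fun acc k => (acc.1 ++ [pvFeats features s k], acc.2 ++ [pvLab s k])) acc ?_]
  · exact pv_foldl_pair _ _ _ acc
  · intro acc k hk
    rw [List.mem_range] at hk
    dsimp only
    have e0 : (3 : Int) + ↑k = 3 + (↑k : Int) := rfl
    have e1 : (3 : Int) + ↑k - 1 = 3 + ((↑k : Int) + -1) := by ring
    have e2 : (3 : Int) + ↑k + 1 = 3 + ((↑k : Int) + 1) := by ring
    have e3 : (3 : Int) + ↑k - 2 = 3 + ((↑k : Int) + -2) := by ring
    have e4 : (3 : Int) + ↑k + 2 = 3 + ((↑k : Int) + 2) := by ring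
    have e5 : (3 : Int) + ↑k - 3 = 3 + ((↑k : Int) + -3) := by ring
    have e6 : (3 : Int) + ↑k + 3 = 3 + ((↑k : Int) + 3) := by ring
    rw [e1, e2, e3, e4, e5, e6, e0,
      pv_padded_get s _ (by omega) (by omega), pv_padded_get s _ (by omega) (by omega),
      pv_padded_get s _ (by omega) (by omega), pv_padded_get s _ (by omega) (by omega),
      pv_padded_get s _ (by omega) (by omega), pv_padded_get s _ (by omega) (by omega),
      pv_padded_get s (↑k) (by omega) (by omega)]
    rw [if_neg (by omega : ¬ ((↑k : Int) < 0)), if_neg (by omega : ¬ ((s.length : Int) ≤ (↑k : Int)))]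
    simp only [apply_ite (Prod.fst : (String × Option String) → String)]
    unfold pvFeats pvW pvLab
    rfl

lemma pv_stepB (features : List String) (s : List (String × Option String))
    (acc : (List (List (String × Int))) × List Int) :
    (((pvShift (s.map Prod.fst) (-1)).zip ((pvShift (s.map Prod.fst) 1).zip ((pvShift (s.map Prod.fst) (-2)).zip
      ((pvShift (s.map Prod.fst) 2).zip ((pvShift (s.map Prod.fst) (-3)).zip (pvShift (s.map Prod.fst) 3)))))).foldl
      (fun X t =>
        let f1 := "w-1=" ++ t.1
        let f2 := "w+1=" ++ t.2.1
        let f3 := "w-2=" ++ t.2.2.1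
        let f4 := "w+2=" ++ t.2.2.2.1
        let f5 := "w-3=" ++ t.2.2.2.2.1
        let f6 := "w+3=" ++ t.2.2.2.2.2
        let featsL := [f1, f2, f3, f4, f5, f6, f1 ++ "&" ++ f3, f2 ++ "&" ++ f4, f1 ++ "&" ++ f2]
        let feats := (featsL.foldl (fun d f => if features.contains f then d.insert f 1 else d)
          (PySem.Dict.empty : PySem.Dict String Int)).items
        X ++ [feats]) acc.1,
     acc.2 ++ s.map (fun p => if p.2 = some "I" then (1 : Int) else -1))
    = (acc.1 ++ (List.range s.length).map (pvFeats features s),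
       acc.2 ++ (List.range s.length).map (pvLab s)) := by
  rw [pv_zip_eq, pv_lab_map, List.foldl_map, pv_foldl_app]
  rfl

-- ===== VERDICT (by name: the statement is the Claim_ definition above) =====
theorem extract_features_dev_or_test_spec : Claim_equal_extract_features_dev_or_test := by
  intro data features _
  unfold Spec_extract_features_dev_or_test extract_features_dev_or_test extract_features_dev_or_test_alt
  refine PySem.List.foldl_congr_mem data _ _ ([], []) ?_
  intro acc s _
  exact (pv_stepA features s acc).trans (pv_stepB features s acc).symm
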